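-- pv_equiv track=rewrite | github.com/hughes7370/deal-aggregator | backend/src/services/newsletter_service.py | normalize_industry
-- ===== SOURCE A (Python) =====
-- def normalize_industry(industry: str) -> str:
--     """Normalize industry name to match standard categories"""
--     industry = industry.lower().strip()
--
--     # Software/SaaS/Technology variations
--     if any(term in industry for term in ['saas', 'software', 'tech', 'app', 'plugin', 'extension', 'mobile']):
--         return 'Software/SaaS'
--
--     # Ecommerce variations
--     elif any(term in industry for term in ['ecommerce', 'e-commerce', 'amazon', 'shopify', 'fba', 'retail', 'commerce']):
--         return 'Ecommerce'
--
--     # Content/Media variations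
--     elif any(term in industry for term in ['content', 'blog', 'media', 'digital', 'youtube', 'social media', 'newsletter', 'advertising', 'entertainment']):
--         return 'Content/Media'
--
--     # Service variations
--     elif any(term in industry for term in ['service', 'consulting', 'agency', 'services']):
--         return 'Service'
--
--     # Manufacturing variations
--     elif any(term in industry for term in ['manufacturing', 'factory', 'production']):
--         return 'Manufacturing'
--
--     # Wholesale/Distribution variations
--     elif any(term in industry for term in ['distribution', 'wholesale']):
--         return 'Wholesale/Distribution'
--
--     # Education variations
--     elif any(term in industry for term in ['education', 'learning', 'teaching', 'edtech']):
--         return 'Education'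
--
--     # Healthcare variations
--     elif any(term in industry for term in ['health', 'healthcare', 'medical']):
--         return 'Healthcare Services'
--
--     # Marketing variations
--     elif any(term in industry for term in ['marketing', 'seo', 'ppc', 'advertising']):
--         return 'Marketing'
--
--     # Renewable Energy variations
--     elif any(term in industry for term in ['renewable', 'energy', 'solar', 'wind']):
--         return 'Renewable Energy'
--
--     else:
--         return 'Other'
-- ===== SOURCE B (Python) =====
-- # Flat (term, rank) index with a global min-rank aggregation: instead of an
-- # ordered first-match cascade over categories, collect the ranks of ALL
-- # matching terms in one comprehension and return the label of the smallest.
-- LABELS = ['Software/SaaS', 'Ecommerce', 'Content/Media', 'Service',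
--           'Manufacturing', 'Wholesale/Distribution', 'Education',
--           'Healthcare Services', 'Marketing', 'Renewable Energy']
--
-- TERMS = [
--     ('saas', 0), ('software', 0), ('tech', 0), ('app', 0), ('plugin', 0), ('extension', 0), ('mobile', 0),
--     ('ecommerce', 1), ('e-commerce', 1), ('amazon', 1), ('shopify', 1), ('fba', 1), ('retail', 1), ('commerce', 1),
--     ('content', 2), ('blog', 2), ('media', 2), ('digital', 2), ('youtube', 2), ('social media', 2), ('newsletter', 2), ('advertising', 2), ('entertainment', 2),
--     ('service', 3), ('consulting', 3), ('agency', 3), ('services', 3),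
--     ('manufacturing', 4), ('factory', 4), ('production', 4),
--     ('distribution', 5), ('wholesale', 5),
--     ('education', 6), ('learning', 6), ('teaching', 6), ('edtech', 6),
--     ('health', 7), ('healthcare', 7), ('medical', 7),
--     ('marketing', 8), ('seo', 8), ('ppc', 8), ('advertising', 8),
--     ('renewable', 9), ('energy', 9), ('solar', 9), ('wind', 9),
-- ]
--
-- def normalize_industry(industry: str) -> str:
--     """Normalize industry name to match standard categories."""
--     s = industry.lower().strip()
--     ranks = [rank for term, rank in TERMS if term in s]
--     return LABELS[min(ranks)] if ranks else 'Other'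
-- ===== Notes on version B (the rewrite author's own statement) =====
-- stated objective: alternative
-- what changed: Replaces the ordered first-match if/elif cascade with a flat (term, rank) index: one comprehension collects the ranks of all matching terms and the answer is the label of the minimum rank (min-aggregation instead of short-circuit priority search).
import Mathlib
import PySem

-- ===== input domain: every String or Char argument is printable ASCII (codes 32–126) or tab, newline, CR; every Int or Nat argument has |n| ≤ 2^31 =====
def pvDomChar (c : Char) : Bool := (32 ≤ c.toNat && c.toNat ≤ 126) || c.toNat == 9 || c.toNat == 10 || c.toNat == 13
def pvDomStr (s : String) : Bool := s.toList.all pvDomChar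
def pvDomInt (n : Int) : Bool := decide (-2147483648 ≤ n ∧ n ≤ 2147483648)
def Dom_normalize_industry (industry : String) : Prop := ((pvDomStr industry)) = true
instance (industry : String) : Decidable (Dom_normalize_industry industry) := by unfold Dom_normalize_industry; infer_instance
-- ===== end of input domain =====

-- ===== PORT A =====
-- One honest line: B replaces A's first-match if/elif cascade by a flat (term, rank) index
-- aggregated with min (alternative decomposition, same cost).
def normalize_industry (industry : String) : String :=
  let industry := PySem.Str.strip (PySem.Str.lower industry)
  if ["saas", "software", "tech", "app", "plugin", "extension", "mobile"].any (fun term => PySem.Str.isIn term industry) then "Software/SaaS"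
  else if ["ecommerce", "e-commerce", "amazon", "shopify", "fba", "retail", "commerce"].any (fun term => PySem.Str.isIn term industry) then "Ecommerce"
  else if ["content", "blog", "media", "digital", "youtube", "social media", "newsletter", "advertising", "entertainment"].any (fun term => PySem.Str.isIn term industry) then "Content/Media"
  else if ["service", "consulting", "agency", "services"].any (fun term => PySem.Str.isIn term industry) then "Service"
  else if ["manufacturing", "factory", "production"].any (fun term => PySem.Str.isIn term industry) then "Manufacturing"
  else if ["distribution", "wholesale"].any (fun term => PySem.Str.isIn term industry) then "Wholesale/Distribution"
  else if ["education", "learning", "teaching", "edtech"].any (fun term => PySem.Str.isIn term industry) then "Education"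
  else if ["health", "healthcare", "medical"].any (fun term => PySem.Str.isIn term industry) then "Healthcare Services"
  else if ["marketing", "seo", "ppc", "advertising"].any (fun term => PySem.Str.isIn term industry) then "Marketing"
  else if ["renewable", "energy", "solar", "wind"].any (fun term => PySem.Str.isIn term industry) then "Renewable Energy"
  else "Other"

-- ===== PORT B =====
def pvLabels : List String :=
  ["Software/SaaS", "Ecommerce", "Content/Media", "Service", "Manufacturing",
   "Wholesale/Distribution", "Education", "Healthcare Services", "Marketing", "Renewable Energy"]

def pvTerms : List (String × Nat) :=
  [("saas", 0), ("software", 0), ("tech", 0), ("app", 0), ("plugin", 0), ("extension", 0), ("mobile", 0),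
   ("ecommerce", 1), ("e-commerce", 1), ("amazon", 1), ("shopify", 1), ("fba", 1), ("retail", 1), ("commerce", 1),
   ("content", 2), ("blog", 2), ("media", 2), ("digital", 2), ("youtube", 2), ("social media", 2), ("newsletter", 2), ("advertising", 2), ("entertainment", 2),
   ("service", 3), ("consulting", 3), ("agency", 3), ("services", 3),
   ("manufacturing", 4), ("factory", 4), ("production", 4),
   ("distribution", 5), ("wholesale", 5),
   ("education", 6), ("learning", 6), ("teaching", 6), ("edtech", 6),
   ("health", 7), ("healthcare", 7), ("medical", 7),
   ("marketing", 8), ("seo", 8), ("ppc", 8), ("advertising", 8),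
   ("renewable", 9), ("energy", 9), ("solar", 9), ("wind", 9)]

def normalize_industry_alt (industry : String) : String :=
  let s := PySem.Str.strip (PySem.Str.lower industry)
  let ranks := (pvTerms.filter (fun p => PySem.Str.isIn p.1 s)).map Prod.snd
  -- 'LABELS[min(ranks)] if ranks else "Other"'; min(ranks) = PySem.List.min?, every rank is < 10 so the index is in range
  match PySem.List.min? ranks (fun x => x) with
  | some r => pvLabels.getD r "Other"
  | none => "Other"

-- ===== PRECONDITION & SPEC =====
def Spec_normalize_industry (industry : String) (out : String) : Prop := out = normalize_industry_alt industry
instance (industry : String) (out : String) : Decidable (Spec_normalize_industry industry out) := by unfold Spec_normalize_industry; infer_instance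

-- ===== CLAIM =====
def Claim_equal_normalize_industry : Prop := ∀ (industry : String), Dom_normalize_industry industry → Spec_normalize_industry industry (normalize_industry industry)

-- ===== LEMMAS AND PROOFS =====

-- A's ten category term lists, indexed by rank
def pvCat (i : Nat) : List String :=
  match i with
  | 0 => ["saas", "software", "tech", "app", "plugin", "extension", "mobile"]
  | 1 => ["ecommerce", "e-commerce", "amazon", "shopify", "fba", "retail", "commerce"]
  | 2 => ["content", "blog", "media", "digital", "youtube", "social media", "newsletter", "advertising", "entertainment"]
  | 3 => ["service", "consulting", "agency", "services"]
  | 4 => ["manufacturing", "factory", "production"]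
  | 5 => ["distribution", "wholesale"]
  | 6 => ["education", "learning", "teaching", "edtech"]
  | 7 => ["health", "healthcare", "medical"]
  | 8 => ["marketing", "seo", "ppc", "advertising"]
  | 9 => ["renewable", "energy", "solar", "wind"]
  | _ => []

theorem pvTerms_sound : ∀ p ∈ pvTerms, p.2 ≤ 9 ∧ p.1 ∈ pvCat p.2 := by decide

theorem pvTerms_complete : ∀ i ∈ List.range 10, ∀ t ∈ pvCat i, (t, i) ∈ pvTerms := by decide

-- membership characterisation of the rank list B builds
theorem mem_ranks (s : String) (x : Nat) :
    x ∈ (pvTerms.filter (fun p => PySem.Str.isIn p.1 s)).map Prod.snd ↔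
      x ≤ 9 ∧ (pvCat x).any (fun t => PySem.Str.isIn t s) = true := by
  constructor
  · rintro hx
    rcases List.mem_map.1 hx with ⟨p, hp, rfl⟩
    rcases List.mem_filter.1 hp with ⟨hmem, hin⟩
    rcases pvTerms_sound p hmem with ⟨h9, hcat⟩
    exact ⟨h9, List.any_eq_true.2 ⟨p.1, hcat, hin⟩⟩
  · rintro ⟨h9, hany⟩
    rcases List.any_eq_true.1 hany with ⟨t, ht, hin⟩
    have hmem : (t, x) ∈ pvTerms :=
      pvTerms_complete x (List.mem_range.2 (by omega)) t ht
    exact List.mem_map.2 ⟨(t, x), List.mem_filter.2 ⟨hmem, hin⟩, rfl⟩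

-- if category i is the first that matches, B returns label i
theorem alt_eq_of_first (s : String) (i : Nat) (h9 : i ≤ 9)
    (hit : (pvCat i).any (fun t => PySem.Str.isIn t s) = true)
    (hlow : ∀ j, j < i → (pvCat j).any (fun t => PySem.Str.isIn t s) = false) :
    (match PySem.List.min? ((pvTerms.filter (fun p => PySem.Str.isIn p.1 s)).map Prod.snd) (fun x => x) with
     | some r => pvLabels.getD r "Other"
     | none => "Other") = pvLabels.getD i "Other" := by
  set ranks := (pvTerms.filter (fun p => PySem.Str.isIn p.1 s)).map Prod.snd with hranks
  have hi : i ∈ ranks := (mem_ranks s i).2 ⟨h9, hit⟩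
  have hne : ranks ≠ [] := fun h => by simp [h] at hi
  rcases hm : PySem.List.min? ranks (fun x => x) with _ | m
  · exact absurd ((PySem.List.min?_eq_none_iff ranks (fun x => x)).1 hm) hne
  · have hmmem : m ∈ ranks := PySem.List.min?_mem hm
    have hle : m ≤ i := PySem.List.min?_isMin hm i hi
    have hge : i ≤ m := by
      rcases (mem_ranks s m).1 hmmem with ⟨_, hany⟩
      by_contra h
      rw [hlow m (by omega)] at hany
      exact Bool.false_ne_true hany
    have : m = i := le_antisymm hle hge
    simp [this]

theorem alt_eq_other (s : String)
    (hall : ∀ j, j ≤ 9 → (pvCat j).any (fun t => PySem.Str.isIn t s) = false) :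
    (match PySem.List.min? ((pvTerms.filter (fun p => PySem.Str.isIn p.1 s)).map Prod.snd) (fun x => x) with
     | some r => pvLabels.getD r "Other"
     | none => "Other") = "Other" := by
  have hnil : (pvTerms.filter (fun p => PySem.Str.isIn p.1 s)).map Prod.snd = [] := by
    rw [List.eq_nil_iff_forall_not_mem]
    intro x hx
    rcases (mem_ranks s x).1 hx with ⟨h9, hany⟩
    rw [hall x h9] at hany
    exact Bool.false_ne_true hany
  rw [hnil]
  simp [PySem.List.min?]

-- ===== VERDICT =====
theorem normalize_industry_spec : Claim_equal_normalize_industry := by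
  intro industry _
  unfold Spec_normalize_industry
  simp only [normalize_industry, normalize_industry_alt]
  set s := PySem.Str.strip (PySem.Str.lower industry) with hs
  split_ifs with h0 h1 h2 h3 h4 h5 h6 h7 h8 h9 <;>
    simp only [Bool.not_eq_true] at *
  · exact (alt_eq_of_first s 0 (by omega) h0 (by omega)).symm
  · exact (alt_eq_of_first s 1 (by omega) h1 (by intro j hj; interval_cases j; exacts [h0])).symm
  · exact (alt_eq_of_first s 2 (by omega) h2 (by intro j hj; interval_cases j; exacts [h0, h1])).symm
  · exact (alt_eq_of_first s 3 (by omega) h3 (by intro j hj; interval_cases j; exacts [h0, h1, h2])).symm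
  · exact (alt_eq_of_first s 4 (by omega) h4 (by intro j hj; interval_cases j; exacts [h0, h1, h2, h3])).symm
  · exact (alt_eq_of_first s 5 (by omega) h5 (by intro j hj; interval_cases j; exacts [h0, h1, h2, h3, h4])).symm
  · exact (alt_eq_of_first s 6 (by omega) h6 (by intro j hj; interval_cases j; exacts [h0, h1, h2, h3, h4, h5])).symm
  · exact (alt_eq_of_first s 7 (by omega) h7 (by intro j hj; interval_cases j; exacts [h0, h1, h2, h3, h4, h5, h6])).symm
  · exact (alt_eq_of_first s 8 (by omega) h8 (by intro j hj; interval_cases j; exacts [h0, h1, h2, h3, h4, h5, h6, h7])).symm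
  · exact (alt_eq_of_first s 9 (by omega) h9 (by intro j hj; interval_cases j; exacts [h0, h1, h2, h3, h4, h5, h6, h7, h8])).symm
  · exact (alt_eq_other s (by intro j hj; interval_cases j; exacts [h0, h1, h2, h3, h4, h5, h6, h7, h8, h9])).symm
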